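-- pv_equiv track=rewrite | github.com/stuxve/ot-pwnshell | icspwnshell/prompt/session_prompt.py | decode_data
-- ===== SOURCE A (Python) =====
-- def decode_data(coils_bytes, count):
--     coils = []
--     for byte in coils_bytes:
--         for bit in range(8):
--             coils.append((byte >> bit) & 0x01)
--             if len(coils) == count:
--                 return coils
--     return coils
-- ===== SOURCE B (Python) =====
-- def decode_data(coils_bytes, count):
--     total = 8 * len(coils_bytes)
--     n = count if 0 < count <= total else total
--     return [(coils_bytes[i >> 3] >> (i & 7)) & 1 for i in range(n)]
-- ===== Notes on version B (the rewrite author's own statement) =====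
-- stated objective: alternative
-- what changed: B replaces A's nested byte/bit loops with early return by a single flat loop over bit indices 0..n-1, computing the output length n arithmetically up front and addressing the source byte and bit position of each index by shift/mask index arithmetic (i>>3, i&7).
import Mathlib
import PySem

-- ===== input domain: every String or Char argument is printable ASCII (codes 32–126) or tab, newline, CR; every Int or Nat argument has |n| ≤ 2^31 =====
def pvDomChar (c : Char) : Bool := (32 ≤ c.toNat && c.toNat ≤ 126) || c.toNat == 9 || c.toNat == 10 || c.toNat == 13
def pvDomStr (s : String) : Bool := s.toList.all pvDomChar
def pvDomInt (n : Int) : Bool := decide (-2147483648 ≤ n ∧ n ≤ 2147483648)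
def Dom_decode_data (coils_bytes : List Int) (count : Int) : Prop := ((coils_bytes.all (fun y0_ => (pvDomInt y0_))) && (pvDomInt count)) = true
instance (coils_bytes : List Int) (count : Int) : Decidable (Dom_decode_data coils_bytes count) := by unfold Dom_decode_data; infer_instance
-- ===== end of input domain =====

-- B replaces A's nested byte/bit loops + early return by one flat loop over bit indices,
-- computing the output length arithmetically and locating each bit by index arithmetic. Objective: alternative.

-- (byte >> bit) & 0x01 for a Python int: arithmetic right shift = floor-division by 2^bit, & 1 = mod 2 (Python mod, nonneg) — exact.
def pvBit (byte : Int) (bit : Nat) : Int := (Int.fdiv byte (2 ^ bit)) % 2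

-- ===== PORT A =====
-- inner 'for bit in range(8)' loop: appends, returns (coils, true) on the early return
def decode_data_inner (byte count : Int) (bits : List Nat) (coils : List Int) : List Int × Bool :=
  match bits with
  | [] => (coils, false)
  | b :: rest =>
    let coils' := coils ++ [pvBit byte b]
    if (coils'.length : Int) = count then (coils', true)
    else decode_data_inner byte count rest coils'

-- outer 'for byte in coils_bytes' loop
def decode_data_outer (count : Int) (bs : List Int) (coils : List Int) : List Int :=
  match bs with
  | [] => coils
  | byte :: rest =>
    let r := decode_data_inner byte count [0, 1, 2, 3, 4, 5, 6, 7] coils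
    if r.2 then r.1 else decode_data_outer count rest r.1

def decode_data (coils_bytes : List Int) (count : Int) : List Int :=
  decode_data_outer count coils_bytes []

-- ===== PORT B =====
-- i >> 3 = i / 8 and i & 7 = i % 8 for the nonnegative loop index i; the list index i/8 is
-- always in range (i < n ≤ 8*len), so getD's default 0 is never used — exact for coils_bytes[i >> 3].
def decode_data_alt (coils_bytes : List Int) (count : Int) : List Int :=
  let total : Int := 8 * coils_bytes.length
  let n : Int := if 0 < count ∧ count ≤ total then count else total
  (List.range n.toNat).map (fun i => pvBit (coils_bytes.getD (i / 8) 0) (i % 8))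

-- ===== PRECONDITION & SPEC =====
def Spec_decode_data (coils_bytes : List Int) (count : Int) (out : List Int) : Prop := out = decode_data_alt coils_bytes count
instance (coils_bytes : List Int) (count : Int) (out : List Int) : Decidable (Spec_decode_data coils_bytes count out) := by unfold Spec_decode_data; infer_instance

-- ===== CLAIM (what is proved, stated in full; the proofs are below) =====
def Claim_equal_decode_data : Prop := ∀ (coils_bytes : List Int) (count : Int), Dom_decode_data coils_bytes count → Spec_decode_data coils_bytes count (decode_data coils_bytes count)

-- ===== LEMMAS AND PROOFS =====

-- all bits of a byte list, in A's order
def pvBitsAll (bs : List Int) : List Int :=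
  bs.flatMap (fun byte => (List.range 8).map (fun bit => pvBit byte bit))

lemma range8 : List.range 8 = [0, 1, 2, 3, 4, 5, 6, 7] := by decide

lemma inner_char (byte count : Int) (bits : List Nat) (coils : List Int) :
    decode_data_inner byte count bits coils =
      (if (coils.length : Int) < count ∧ count ≤ ((coils ++ bits.map (pvBit byte)).length : Int)
       then ((coils ++ bits.map (pvBit byte)).take count.toNat, true)
       else (coils ++ bits.map (pvBit byte), false)) := by
  induction bits generalizing coils with
  | nil =>
    simp only [decode_data_inner, List.map_nil, List.append_nil]
    rw [if_neg (by omega)]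
  | cons b rest ih =>
    simp only [decode_data_inner]
    have hsplit : (coils ++ [pvBit byte b]) ++ List.map (pvBit byte) rest
        = coils ++ List.map (pvBit byte) (b :: rest) := by simp
    by_cases h : ((coils ++ [pvBit byte b]).length : Int) = count
    · rw [if_pos h]
      have h' : (coils.length : Int) + 1 = count := by
        simp only [List.length_append, List.length_cons, List.length_nil] at h; push_cast at h; omega
      have hcond : (coils.length : Int) < count ∧
          count ≤ ((coils ++ List.map (pvBit byte) (b :: rest)).length : Int) := by
        simp only [List.length_append, List.length_map, List.length_cons]; push_cast; omega
      rw [if_pos hcond]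
      have htoNat : count.toNat = (coils ++ [pvBit byte b]).length := by
        simp only [List.length_append, List.length_cons, List.length_nil]; omega
      rw [← hsplit, htoNat, List.take_append_of_le_length le_rfl, List.take_length]
    · rw [if_neg h, ih, ← hsplit]
      have h' : (coils.length : Int) + 1 ≠ count := by
        simp only [List.length_append, List.length_cons, List.length_nil] at h; push_cast at h; omega
      have hiff : (((coils ++ [pvBit byte b]).length : Int) < count ∧
            count ≤ (((coils ++ [pvBit byte b]) ++ List.map (pvBit byte) rest).length : Int)) ↔
          ((coils.length : Int) < count ∧
            count ≤ (((coils ++ [pvBit byte b]) ++ List.map (pvBit byte) rest).length : Int)) := by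
        simp only [List.length_append, List.length_map, List.length_cons, List.length_nil]
        push_cast; omega
      rw [if_congr hiff rfl rfl]

lemma outer_char (count : Int) (bs : List Int) (coils : List Int) :
    decode_data_outer count bs coils =
      (if (coils.length : Int) < count ∧ count ≤ ((coils ++ pvBitsAll bs).length : Int)
       then (coils ++ pvBitsAll bs).take count.toNat
       else coils ++ pvBitsAll bs) := by
  induction bs generalizing coils with
  | nil =>
    simp only [decode_data_outer, pvBitsAll, List.flatMap_nil, List.append_nil]
    rw [if_neg (by omega)]
  | cons byte rest ih =>
    simp only [decode_data_outer]
    rw [inner_char]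
    have hdef : pvBitsAll (byte :: rest)
        = List.map (pvBit byte) [0, 1, 2, 3, 4, 5, 6, 7] ++ pvBitsAll rest := by
      simp only [pvBitsAll, List.flatMap_cons, range8]
    by_cases hc : (coils.length : Int) < count ∧
        count ≤ ((coils ++ List.map (pvBit byte) [0, 1, 2, 3, 4, 5, 6, 7]).length : Int)
    · rw [if_pos hc]
      dsimp only
      rw [if_pos rfl]
      have hcond : (coils.length : Int) < count ∧
          count ≤ ((coils ++ pvBitsAll (byte :: rest)).length : Int) := by
        simp only [hdef, List.length_append, List.length_map, List.length_cons,
          List.length_nil] at hc ⊢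
        push_cast at hc ⊢; omega
      rw [if_pos hcond]
      have hle : count.toNat ≤ (coils ++ List.map (pvBit byte) [0, 1, 2, 3, 4, 5, 6, 7]).length := by
        simp only [List.length_append, List.length_map, List.length_cons, List.length_nil] at hc ⊢
        omega
      rw [hdef, ← List.append_assoc, List.take_append_of_le_length hle]
    · rw [if_neg hc]
      dsimp only
      rw [if_neg (by simp)]
      rw [ih, hdef, ← List.append_assoc]
      have hiff : (((coils ++ List.map (pvBit byte) [0, 1, 2, 3, 4, 5, 6, 7]).length : Int) < count ∧
            count ≤ (((coils ++ List.map (pvBit byte) [0, 1, 2, 3, 4, 5, 6, 7]) ++ pvBitsAll rest).length : Int)) ↔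
          ((coils.length : Int) < count ∧
            count ≤ (((coils ++ List.map (pvBit byte) [0, 1, 2, 3, 4, 5, 6, 7]) ++ pvBitsAll rest).length : Int)) := by
        simp only [List.length_append, List.length_map, List.length_cons, List.length_nil] at hc ⊢
        push_cast at hc ⊢; omega
      rw [if_congr hiff rfl rfl]

lemma pvBitsAll_length (bs : List Int) : (pvBitsAll bs).length = 8 * bs.length := by
  induction bs with
  | nil => simp [pvBitsAll]
  | cons b rest ih => simp only [pvBitsAll, List.flatMap_cons, List.length_append,
      List.length_map, List.length_range, List.length_cons] at ih ⊢; omega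

lemma pvBitsAll_getElem? (bs : List Int) (i : Nat) (h : i < (pvBitsAll bs).length) :
    (pvBitsAll bs)[i]? = some (pvBit (bs.getD (i / 8) 0) (i % 8)) := by
  induction bs generalizing i with
  | nil => simp [pvBitsAll] at h
  | cons b rest ih =>
    have hlen : (pvBitsAll (b :: rest)) =
        (List.range 8).map (fun bit => pvBit b bit) ++ pvBitsAll rest := by
      simp [pvBitsAll]
    rw [hlen, List.getElem?_append]
    by_cases hi : i < 8
    · rw [if_pos (by simp [hi])]
      have hdiv : i / 8 = 0 := Nat.div_eq_of_lt hi
      have hmod : i % 8 = i := Nat.mod_eq_of_lt hi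
      simp [hdiv, hmod, hi]
    · have h8 : 8 ≤ i := Nat.le_of_not_lt hi
      have hlt : i - 8 < (pvBitsAll rest).length := by
        rw [hlen] at h; simp at h; omega
      rw [if_neg (by simp; omega)]
      simp only [List.length_map, List.length_range]
      rw [ih (i - 8) hlt]
      have hdiv : i / 8 = (i - 8) / 8 + 1 := by omega
      have hmod : i % 8 = (i - 8) % 8 := by omega
      rw [hdiv, hmod]
      simp

lemma map_range_eq_take (bs : List Int) (n : Nat) (hn : n ≤ (pvBitsAll bs).length) :
    (List.range n).map (fun i => pvBit (bs.getD (i / 8) 0) (i % 8)) = (pvBitsAll bs).take n := by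
  apply List.ext_getElem
  · simp [hn]
  · intro i h1 h2
    simp only [List.length_map, List.length_range] at h1
    simp only [List.getElem_map, List.getElem_range, List.getElem_take]
    have := pvBitsAll_getElem? bs i (by omega)
    rw [List.getElem?_eq_getElem (by omega)] at this
    exact (Option.some.injEq _ _).mp this |>.symm

-- ===== VERDICT (by name: the statement is the Claim_ definition above) =====
theorem decode_data_spec : Claim_equal_decode_data := by
  intro coils_bytes count _
  unfold Spec_decode_data decode_data decode_data_alt
  rw [outer_char]
  simp only [List.nil_append, List.length_nil, Nat.cast_zero]
  have htot : ((pvBitsAll coils_bytes).length : Int) = 8 * (coils_bytes.length : Int) := by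
    rw [pvBitsAll_length]; push_cast; ring
  by_cases hc : 0 < count ∧ count ≤ 8 * (coils_bytes.length : Int)
  · rw [if_pos (by omega), if_pos hc, map_range_eq_take _ _ (by omega)]
  · rw [if_neg (by omega), if_neg hc, map_range_eq_take _ _ (by omega)]
    have h8 : (8 * (coils_bytes.length : Int)).toNat = (pvBitsAll coils_bytes).length := by
      rw [pvBitsAll_length]; omega
    rw [h8, List.take_length]
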